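-- pv_equiv track=rewrite | github.com/thiagodsti/partiu | backend/parsers/email_connector.py | _parse_ics_text
-- ===== SOURCE A (Python) =====
-- def _parse_ics_text(ics: str) -> str:
--     """Convert an ICS calendar attachment to a one-line flight summary."""
--     summary = description = dtstart = dtend = ""
--     for line in ics.splitlines():
--         line = line.strip()
--         if line.startswith("SUMMARY:"):
--             summary = line[8:]
--         elif line.startswith("DESCRIPTION:"):
--             description = line[12:].replace("\\n", " ").replace("\\,", ",")
--         elif line.startswith("DTSTART:"):
--             dtstart = line[8:]
--         elif line.startswith("DTEND:"):
--             dtend = line[6:]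
--     parts = []
--     if summary:
--         parts.append(f"Flight: {summary}")
--     if description:
--         parts.append(f"Details: {description.split('http')[0].strip()}")
--     if dtstart:
--         parts.append(f"Departure (UTC): {dtstart}")
--     if dtend:
--         parts.append(f"Arrival (UTC): {dtend}")
--     return "\n".join(parts)
-- ===== SOURCE B (Python) =====
-- def _parse_ics_text(ics: str) -> str:
--     """Convert an ICS calendar attachment to a one-line flight summary."""
--     lines = [raw.strip() for raw in ics.splitlines()]
--
--     def last_value(prefix):
--         # last matching line wins, so search backwards and stop at the first hit
--         for line in reversed(lines):
--             if line.startswith(prefix):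
--                 return line[len(prefix):]
--         return ""
--
--     parts = []
--     summary = last_value("SUMMARY:")
--     if summary:
--         parts.append(f"Flight: {summary}")
--     description = last_value("DESCRIPTION:").replace("\\n", " ").replace("\\,", ",")
--     if description:
--         parts.append(f"Details: {description.split('http')[0].strip()}")
--     dtstart = last_value("DTSTART:")
--     if dtstart:
--         parts.append(f"Departure (UTC): {dtstart}")
--     dtend = last_value("DTEND:")
--     if dtend:
--         parts.append(f"Arrival (UTC): {dtend}")
--     return "\n".join(parts)
-- ===== Notes on version B (the rewrite author's own statement) =====
-- stated objective: alternative
-- what changed: Replaces A's single forward pass that threads four mutable field accumulators through every line by an orthogonal decomposition: strip all lines once, then extract each of the four fields independently with a backward search (first match in the reversed line list = last surviving assignment) that exits early, trading one stateful pass for four stateless searches.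
import Mathlib
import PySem

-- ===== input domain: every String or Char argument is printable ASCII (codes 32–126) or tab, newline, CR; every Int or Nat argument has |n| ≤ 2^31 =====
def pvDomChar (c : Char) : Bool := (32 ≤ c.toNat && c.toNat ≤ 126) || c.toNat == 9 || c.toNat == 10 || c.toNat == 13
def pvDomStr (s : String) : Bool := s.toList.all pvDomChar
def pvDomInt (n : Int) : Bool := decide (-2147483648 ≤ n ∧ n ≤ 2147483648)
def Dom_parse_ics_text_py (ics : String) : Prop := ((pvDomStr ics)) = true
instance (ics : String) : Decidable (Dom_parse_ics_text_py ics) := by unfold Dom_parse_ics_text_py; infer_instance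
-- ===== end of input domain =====

-- B replaces A's single forward pass with four mutable accumulators by an orthogonal
-- decomposition: strip all lines once, then for each field search the line list BACKWARDS
-- for the first (= last surviving) matching line, with early exit (objective: alternative;
-- same output on every input).

-- ===== PORT A =====
-- the four field accumulators of A's loop, as one tuple (summary, description, dtstart, dtend)
def pvStepA (st : List Char × List Char × List Char × List Char) (raw : List Char) :
    List Char × List Char × List Char × List Char :=
  let line := PySem.Chars.strip raw
  if PySem.Chars.startswith line "SUMMARY:".toList then
    (PySem.Chars.slice line (some 8) none, st.2.1, st.2.2.1, st.2.2.2)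
  else if PySem.Chars.startswith line "DESCRIPTION:".toList then
    (st.1,
     PySem.Chars.replace (PySem.Chars.replace (PySem.Chars.slice line (some 12) none)
       "\\n".toList " ".toList) "\\,".toList ",".toList,
     st.2.2.1, st.2.2.2)
  else if PySem.Chars.startswith line "DTSTART:".toList then
    (st.1, st.2.1, PySem.Chars.slice line (some 8) none, st.2.2.2)
  else if PySem.Chars.startswith line "DTEND:".toList then
    (st.1, st.2.1, st.2.2.1, PySem.Chars.slice line (some 6) none)
  else st

-- description.split('http')[0]: 'http' ≠ "" so split? is some, and a split result is never
-- empty, so the [0] is its head (headD [] is exact here)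
def pvHttpHead (de : List Char) : List Char :=
  ((PySem.Chars.split? de "http".toList).getD []).headD []

def parse_ics_text_py (ics : String) : String :=
  let st := (PySem.Chars.splitlines ics.toList).foldl pvStepA ([], [], [], [])
  let parts : List (List Char) := []
  let parts := if st.1 = [] then parts else parts ++ ["Flight: ".toList ++ st.1]
  let parts := if st.2.1 = [] then parts
               else parts ++ ["Details: ".toList ++ PySem.Chars.strip (pvHttpHead st.2.1)]
  let parts := if st.2.2.1 = [] then parts else parts ++ ["Departure (UTC): ".toList ++ st.2.2.1]
  let parts := if st.2.2.2 = [] then parts else parts ++ ["Arrival (UTC): ".toList ++ st.2.2.2]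
  String.ofList (PySem.Chars.join "\n".toList parts)

-- ===== PORT B =====
-- B's last_value: walk the reversed line list, return the first match's tail, "" if none
def pvLastValue (pre : List Char) : List (List Char) → List Char
  | [] => []
  | line :: rest =>
    if PySem.Chars.startswith line pre then
      PySem.Chars.slice line (some (pre.length : Int)) none
    else pvLastValue pre rest

def parse_ics_text_py_alt (ics : String) : String :=
  let lines := (PySem.Chars.splitlines ics.toList).map PySem.Chars.strip
  let rlines := lines.reverse
  let parts : List (List Char) := []
  let summary := pvLastValue "SUMMARY:".toList rlines
  let parts := if summary = [] then parts else parts ++ ["Flight: ".toList ++ summary]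
  let description := PySem.Chars.replace (PySem.Chars.replace
    (pvLastValue "DESCRIPTION:".toList rlines) "\\n".toList " ".toList) "\\,".toList ",".toList
  let parts := if description = [] then parts
               else parts ++ ["Details: ".toList ++ PySem.Chars.strip (pvHttpHead description)]
  let dtstart := pvLastValue "DTSTART:".toList rlines
  let parts := if dtstart = [] then parts else parts ++ ["Departure (UTC): ".toList ++ dtstart]
  let dtend := pvLastValue "DTEND:".toList rlines
  let parts := if dtend = [] then parts else parts ++ ["Arrival (UTC): ".toList ++ dtend]
  String.ofList (PySem.Chars.join "\n".toList parts)

-- ===== PRECONDITION & SPEC =====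
def Spec_parse_ics_text_py (ics : String) (out : String) : Prop := out = parse_ics_text_py_alt ics
instance (ics : String) (out : String) : Decidable (Spec_parse_ics_text_py ics out) := by unfold Spec_parse_ics_text_py; infer_instance

-- ===== CLAIM (what is proved, stated in full; the proofs are below) =====
def Claim_equal_parse_ics_text_py : Prop := ∀ (ics : String), Dom_parse_ics_text_py ics → Spec_parse_ics_text_py ics (parse_ics_text_py ics)

-- ===== LEMMAS AND PROOFS =====

-- DESCRIPTION's transforms, shared shorthand for the proofs
def pvTransform (v : List Char) : List Char :=
  PySem.Chars.replace (PySem.Chars.replace v "\\n".toList " ".toList) "\\,".toList ",".toList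

-- a line starts with at most one of the four field prefixes
theorem pvExcl (l p q : List Char) (hpq : ¬ (p <+: q ∨ q <+: p))
    (hp : PySem.Chars.startswith l p = true) :
    PySem.Chars.startswith l q = false := by
  by_contra h
  have hq : PySem.Chars.startswith l q = true := by
    cases hx : PySem.Chars.startswith l q <;> simp_all
  rw [PySem.Chars.startswith_iff] at hp hq
  exact hpq (List.prefix_or_prefix_of_prefix hp hq)

-- per-line, per-component characterisation of A's step
theorem pvStepA_1 (st : List Char × List Char × List Char × List Char) (raw : List Char) :
    (pvStepA st raw).1 =
      (if PySem.Chars.startswith (PySem.Chars.strip raw) "SUMMARY:".toList then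
        PySem.Chars.slice (PySem.Chars.strip raw) (some 8) none else st.1) := by
  simp only [pvStepA]
  split_ifs <;> rfl

theorem pvStepA_2 (st : List Char × List Char × List Char × List Char) (raw : List Char) :
    (pvStepA st raw).2.1 =
      (if PySem.Chars.startswith (PySem.Chars.strip raw) "DESCRIPTION:".toList then
        pvTransform (PySem.Chars.slice (PySem.Chars.strip raw) (some 12) none) else st.2.1) := by
  simp only [pvStepA, pvTransform]
  by_cases hS : PySem.Chars.startswith (PySem.Chars.strip raw) "SUMMARY:".toList = true
  · have hD := pvExcl _ "SUMMARY:".toList "DESCRIPTION:".toList (by decide) hS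
    rw [if_pos hS, if_neg (by simp only [hD]; decide)]
  · rw [if_neg hS]
    by_cases hD : PySem.Chars.startswith (PySem.Chars.strip raw) "DESCRIPTION:".toList = true
    · rw [if_pos hD, if_pos hD]
    · rw [if_neg hD, if_neg hD]
      split_ifs <;> rfl

theorem pvStepA_3 (st : List Char × List Char × List Char × List Char) (raw : List Char) :
    (pvStepA st raw).2.2.1 =
      (if PySem.Chars.startswith (PySem.Chars.strip raw) "DTSTART:".toList then
        PySem.Chars.slice (PySem.Chars.strip raw) (some 8) none else st.2.2.1) := by
  simp only [pvStepA]
  by_cases hS : PySem.Chars.startswith (PySem.Chars.strip raw) "SUMMARY:".toList = true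
  · have hT := pvExcl _ "SUMMARY:".toList "DTSTART:".toList (by decide) hS
    rw [if_pos hS, if_neg (by simp only [hT]; decide)]
  · rw [if_neg hS]
    by_cases hD : PySem.Chars.startswith (PySem.Chars.strip raw) "DESCRIPTION:".toList = true
    · have hT := pvExcl _ "DESCRIPTION:".toList "DTSTART:".toList (by decide) hD
      rw [if_pos hD, if_neg (by simp only [hT]; decide)]
    · rw [if_neg hD]
      by_cases hT : PySem.Chars.startswith (PySem.Chars.strip raw) "DTSTART:".toList = true
      · rw [if_pos hT, if_pos hT]
      · rw [if_neg hT, if_neg hT]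
        split_ifs <;> rfl

theorem pvStepA_4 (st : List Char × List Char × List Char × List Char) (raw : List Char) :
    (pvStepA st raw).2.2.2 =
      (if PySem.Chars.startswith (PySem.Chars.strip raw) "DTEND:".toList then
        PySem.Chars.slice (PySem.Chars.strip raw) (some 6) none else st.2.2.2) := by
  simp only [pvStepA]
  by_cases hS : PySem.Chars.startswith (PySem.Chars.strip raw) "SUMMARY:".toList = true
  · have hE := pvExcl _ "SUMMARY:".toList "DTEND:".toList (by decide) hS
    rw [if_pos hS, if_neg (by simp only [hE]; decide)]
  · rw [if_neg hS]
    by_cases hD : PySem.Chars.startswith (PySem.Chars.strip raw) "DESCRIPTION:".toList = true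
    · have hE := pvExcl _ "DESCRIPTION:".toList "DTEND:".toList (by decide) hD
      rw [if_pos hD, if_neg (by simp only [hE]; decide)]
    · rw [if_neg hD]
      by_cases hT : PySem.Chars.startswith (PySem.Chars.strip raw) "DTSTART:".toList = true
      · have hE := pvExcl _ "DTSTART:".toList "DTEND:".toList (by decide) hT
        rw [if_pos hT, if_neg (by simp only [hE]; decide)]
      · rw [if_neg hT]
        by_cases hE : PySem.Chars.startswith (PySem.Chars.strip raw) "DTEND:".toList = true
        · rw [if_pos hE, if_pos hE]
        · rw [if_neg hE, if_neg hE]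

-- the fold's component equals a backward search over the stripped lines
theorem pvFold_lastValue (pre : List Char) (n : Int)
    (f : List Char → List Char)
    (get : List Char × List Char × List Char × List Char → List Char)
    (hstep : ∀ st raw, get (pvStepA st raw) =
      (if PySem.Chars.startswith (PySem.Chars.strip raw) pre then
        f (PySem.Chars.slice (PySem.Chars.strip raw) (some n) none) else get st))
    (ls : List (List Char)) (st : List Char × List Char × List Char × List Char) :
    get (ls.foldl pvStepA st) =
      (match (ls.map PySem.Chars.strip).reverse.find?
          (fun l => PySem.Chars.startswith l pre) with
        | some l => f (PySem.Chars.slice l (some n) none)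
        | none => get st) := by
  induction ls using List.reverseRecOn generalizing st with
  | nil => simp
  | append_singleton ls l ih =>
    rw [List.foldl_append, List.foldl_cons, List.foldl_nil, hstep]
    simp only [List.map_append, List.map_cons, List.map_nil, List.reverse_append,
      List.reverse_cons, List.reverse_nil, List.nil_append, List.cons_append,
      List.find?_cons]
    by_cases h : PySem.Chars.startswith (PySem.Chars.strip l) pre = true
    · simp [h]
    · simp only [Bool.not_eq_true] at h
      simp [h, ih]

-- B's backward search against find?
theorem pvLastValue_eq_find (pre : List Char) (xs : List (List Char)) :
    pvLastValue pre xs =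
      (match xs.find? (fun l => PySem.Chars.startswith l pre) with
        | some l => PySem.Chars.slice l (some (pre.length : Int)) none
        | none => []) := by
  induction xs with
  | nil => rfl
  | cons l rest ih =>
    unfold pvLastValue
    rw [List.find?_cons]
    by_cases h : PySem.Chars.startswith l pre = true
    · simp [h]
    · simp only [Bool.not_eq_true] at h
      simp [h, ih]

-- ===== VERDICT (by name: the statement is the Claim_ definition above) =====
theorem parse_ics_text_py_spec : Claim_equal_parse_ics_text_py := by
  intro ics _
  unfold Spec_parse_ics_text_py parse_ics_text_py parse_ics_text_py_alt
  set ls := PySem.Chars.splitlines ics.toList with hls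
  have h1 := pvFold_lastValue "SUMMARY:".toList 8 id (·.1)
    (fun st raw => pvStepA_1 st raw) ls ([], [], [], [])
  have h2 := pvFold_lastValue "DESCRIPTION:".toList 12 pvTransform (·.2.1)
    (fun st raw => pvStepA_2 st raw) ls ([], [], [], [])
  have h3 := pvFold_lastValue "DTSTART:".toList 8 id (·.2.2.1)
    (fun st raw => pvStepA_3 st raw) ls ([], [], [], [])
  have h4 := pvFold_lastValue "DTEND:".toList 6 id (·.2.2.2)
    (fun st raw => pvStepA_4 st raw) ls ([], [], [], [])
  have e1 := pvLastValue_eq_find "SUMMARY:".toList (ls.map PySem.Chars.strip).reverse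
  have e2 := pvLastValue_eq_find "DESCRIPTION:".toList (ls.map PySem.Chars.strip).reverse
  have e3 := pvLastValue_eq_find "DTSTART:".toList (ls.map PySem.Chars.strip).reverse
  have e4 := pvLastValue_eq_find "DTEND:".toList (ls.map PySem.Chars.strip).reverse
  have len1 : (("SUMMARY:".toList.length : Nat) : Int) = 8 := by decide
  have len2 : (("DESCRIPTION:".toList.length : Nat) : Int) = 12 := by decide
  have len3 : (("DTSTART:".toList.length : Nat) : Int) = 8 := by decide
  have len4 : (("DTEND:".toList.length : Nat) : Int) = 6 := by decide
  rw [len1] at e1; rw [len2] at e2; rw [len3] at e3; rw [len4] at e4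
  simp only [h1, h2, h3, h4, e1, e2, e3, e4, id, pvTransform]
  cases (ls.map PySem.Chars.strip).reverse.find?
      (fun l => PySem.Chars.startswith l "DESCRIPTION:".toList) with
  | none => simp; rfl
  | some l => rfl
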